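-- pv_equiv track=rewrite | github.com/yhoo0007/string-algos | boyermoore.py | get_matched_prefix
-- ===== SOURCE A (Python) =====
-- def z_algo(string):
--     '''
--     Performs Gusfield's Z-algorithm on the given string and returns the resulting Z-array.
--         string: String of characters as input to the Z-algorithm.
--         Time:   O(n)
--         Space:  O(n)
--             where:
--             n = length of 'string'
--     '''
--     if not hasattr(string, '__len__'):
--         string = list(string)
--
--     n = len(string)
--     if n == 0:
--         return []
--
--     z = [0 for _ in range(n)]
--     z[0] = n
--
--     l, r = 0, 0
--     for i in range(1, len(z)):
--         if i > r:  # case 1 : i not in zbox, explicit comparisons until mismatch is found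
--             j = i
--             while j < n and string[j] == string[j - i]:
--                 z[i] += 1
--                 j += 1
--
--             if z[i] > 0:  # form zbox if number of matches > 0
--                 l, r = i, j - 1
--         else:
--             k = i - l
--             remaining = r - i + 1
--             if z[k] < remaining:  # case 2a : z[k] < remaining
--                 z[i] = z[k]
--
--             elif z[k] > remaining:  # case 2b : z[k] > remaining
--                 z[i] = remaining
--
--             else:  # case 2c : z[k] = remaining, explicit comparisons from r + 1 until mismatch is found
--                 z[i] = z[k]
--                 matches = 0
--                 j = r + 1
--                 k = z[i]
--                 while j < n and string[j] == string[k]: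
--                     z[i] += 1
--                     matches += 1
--                     j += 1
--                     k += 1
--
--                 if matches > 0:  # form new zbox if number of matches > 0
--                     l, r = i, j - 1
--     return z
--
-- def get_matched_prefix(pat):
--     '''
--     Returns the 'matched prefix' lookup table to be used in the Boyer Moore algorithm. Each value
--     (v) in the lookup table represents the length of the longest suffix that matches the prefix of
--     pat.
--         pat:    String of characters to generate lookup table for.
--         Time:   O(n)
--         Space:  O(n)
--             where:
--             n = length of 'pat'
--     '''
--     z_array = z_algo(pat)
--     matched_prefix = [0 for _ in range(len(pat) + 1)]
--     for i in range(len(pat) - 1, -1, -1):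
--         matched_prefix[i] = z_array[i] if z_array[i] + i == len(pat) else matched_prefix[i + 1]
--
--         if matched_prefix[i] > len(pat) - 1:  # limit max value of mp such that m - mp will always be at least 1
--             matched_prefix[i] = len(pat) - 1
--     return matched_prefix
-- ===== SOURCE B (Python) =====
-- def get_matched_prefix(pat):
--     # Border-table formulation: g[k] = longest border (suffix == prefix) of pat
--     # with length <= k, built forward by direct slice comparison; then
--     # matched_prefix[i] = min(g[n - i], n - 1).
--     n = len(pat)
--     if n == 0:
--         return [0]
--     g = [0]
--     for L in range(1, n + 1):
--         g.append(L if pat[n - L:] == pat[:L] else g[-1])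
--     return [min(g[n - i], n - 1) for i in range(n + 1)]
-- ===== Notes on version B (the rewrite author's own statement) =====
-- stated objective: alternative
-- what changed: Replaces the Z-array pass plus backward in-place fill by a forward-built border table g (g[k] = longest border of length <= k, tested by direct slice comparison) and a single comprehension min(g[n-i], n-1).
import Mathlib
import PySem

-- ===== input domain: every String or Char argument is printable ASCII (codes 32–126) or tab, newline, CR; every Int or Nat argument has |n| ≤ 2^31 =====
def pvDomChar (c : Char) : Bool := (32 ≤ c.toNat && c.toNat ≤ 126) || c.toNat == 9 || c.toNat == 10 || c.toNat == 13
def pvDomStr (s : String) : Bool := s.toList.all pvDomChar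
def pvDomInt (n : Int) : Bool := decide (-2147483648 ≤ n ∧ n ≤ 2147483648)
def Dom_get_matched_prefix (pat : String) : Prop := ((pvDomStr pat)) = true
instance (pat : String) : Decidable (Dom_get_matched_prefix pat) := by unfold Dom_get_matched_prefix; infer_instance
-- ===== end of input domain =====

-- B replaces A's Z-array pass + backward in-place fill by a forward-built border table
-- (direct slice comparisons) and a single map; alternative decomposition, not faster.

-- ===== PORT A =====
-- while j < n and string[j] == string[k]: counts matches; returns (count, final j).
-- Used for both explicit-comparison loops of z_algo (case 1 with k starting at 0, case 2c).
-- fuel (= n - j, enough for the loop to finish) only makes the recursion structural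
def pvZext (s : List Char) : Nat → Nat → Nat → Nat → Nat × Nat
| 0, j, _, cnt => (cnt, j)
| fuel+1, j, k, cnt =>
  if j < s.length ∧ s[j]? = s[k]? then pvZext s fuel (j+1) (k+1) (cnt+1) else (cnt, j)

-- the 'for i in range(1, len(z))' loop of z_algo, state (z, l, r)
-- the 'for i in range(1, len(z))' loop of z_algo, state (z, l, r); fuel = number of
-- remaining iterations (= n - i), making the recursion structural
def pvZmain (s : List Char) : Nat → Nat → List Nat → Nat → Nat → List Nat
| 0, _, z, _, _ => z
| fuel+1, i, z, l, r =>
  if i > r then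
    let p := pvZext s (s.length - i) i 0 0
    if p.1 > 0 then pvZmain s fuel (i+1) (z.set i p.1) i (p.2 - 1)
    else pvZmain s fuel (i+1) (z.set i p.1) l r
  else
    let k := i - l
    let remaining := r - i + 1
    let zk := z.getD k 0
    if zk < remaining then pvZmain s fuel (i+1) (z.set i zk) l r
    else if zk > remaining then pvZmain s fuel (i+1) (z.set i remaining) l r
    else
      let p := pvZext s (s.length - (r+1)) (r+1) zk 0
      if p.1 > 0 then pvZmain s fuel (i+1) (z.set i (zk + p.1)) i (p.2 - 1)
      else pvZmain s fuel (i+1) (z.set i (zk + p.1)) l r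

def pvZalgo (s : List Char) : List Nat :=
  if s.length = 0 then [] else
  pvZmain s (s.length - 1) 1 ((List.replicate s.length 0).set 0 s.length) 0 0

-- the backward fill 'for i in range(len(pat)-1, -1, -1)', building the list back to front;
-- pvFillA s z c is matched_prefix[n-c .. n]
def pvFillA (s : List Char) (z : List Nat) : Nat → List Int
| 0 => [0]
| c+1 =>
  let rest := pvFillA s z c
  let i := s.length - (c+1)
  let zi := z.getD i 0
  let v : Int := if zi + i = s.length then (zi : Int) else rest.headD 0
  (if v > (s.length : Int) - 1 then (s.length : Int) - 1 else v) :: rest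

def get_matched_prefix (pat : String) : List Int :=
  pvFillA pat.toList (pvZalgo pat.toList) pat.toList.length

-- ===== PORT B =====
-- pat[n-L:] == pat[:L]
def pvIsBorder (s : List Char) (L : Nat) : Bool := s.drop (s.length - L) == s.take L

def get_matched_prefix_alt (pat : String) : List Int :=
  let s := pat.toList
  let n := s.length
  if n = 0 then [0] else
  let g := (List.range' 1 n).foldl
    (fun g L => g ++ [if pvIsBorder s L then L else g.getLastD 0]) [0]
  (List.range (n+1)).map (fun i => min ((g.getD (n - i) 0 : Nat) : Int) ((n : Int) - 1))

-- ===== PRECONDITION & SPEC =====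
def Spec_get_matched_prefix (pat : String) (out : List Int) : Prop := out = get_matched_prefix_alt pat
instance (pat : String) (out : List Int) : Decidable (Spec_get_matched_prefix pat out) := by unfold Spec_get_matched_prefix; infer_instance

-- ===== CLAIM (what is proved, stated in full; the proofs are below) =====
def Claim_equal_get_matched_prefix : Prop := ∀ (pat : String), Dom_get_matched_prefix pat → Spec_get_matched_prefix pat (get_matched_prefix pat)

-- ===== LEMMAS AND PROOFS =====

-- longest common prefix length
def pvLcp : List Char → List Char → Nat
| a :: as, b :: bs => if a = b then pvLcp as bs + 1 else 0
| _, _ => 0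

-- the Z function
def pvZ (s : List Char) (i : Nat) : Nat := pvLcp s (s.drop i)

-- longest border of length ≤ k
def pvMB (s : List Char) : Nat → Nat
| 0 => 0
| k+1 => if pvIsBorder s (k+1) then k+1 else pvMB s k

theorem pvLcp_nil_right (a : List Char) : pvLcp a [] = 0 := by
  cases a <;> rfl

theorem pvLcp_comm (a b : List Char) : pvLcp a b = pvLcp b a := by
  induction a generalizing b with
  | nil => cases b <;> rfl
  | cons x as ih =>
    cases b with
    | nil => rfl
    | cons y bs =>
      simp only [pvLcp]
      by_cases h : x = y
      · subst h; simp [ih]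
      · simp [h, Ne.symm h]

theorem pvLcp_le_left (a b : List Char) : pvLcp a b ≤ a.length := by
  induction a generalizing b with
  | nil => simp [pvLcp]
  | cons x as ih =>
    cases b with
    | nil => simp [pvLcp]
    | cons y bs =>
      simp only [pvLcp, List.length_cons]
      split
      · exact Nat.succ_le_succ (ih bs)
      · omega

theorem pvLcp_le_right (a b : List Char) : pvLcp a b ≤ b.length := by
  rw [pvLcp_comm]; exact pvLcp_le_left b a

theorem pvLcp_self (a : List Char) : pvLcp a a = a.length := by
  induction a with
  | nil => rfl
  | cons x as ih => simp [pvLcp, ih]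

-- characters below the lcp agree
theorem pvLcp_getElem?_eq (a b : List Char) (t : Nat) (h : t < pvLcp a b) :
    a[t]? = b[t]? := by
  induction a generalizing b t with
  | nil => simp [pvLcp] at h
  | cons x as ih =>
    cases b with
    | nil => simp [pvLcp] at h
    | cons y bs =>
      simp only [pvLcp] at h
      by_cases hxy : x = y
      · subst hxy
        rw [if_pos rfl] at h
        cases t with
        | zero => simp
        | succ t =>
          simp only [List.getElem?_cons_succ]
          exact ih bs t (by omega)
      · simp [hxy] at h

theorem pvLcp_take (a b : List Char) (m : Nat) (h : m ≤ pvLcp a b) :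
    a.take m = b.take m := by
  induction a generalizing b m with
  | nil =>
    have h0 : pvLcp [] b = 0 := by cases b <;> rfl
    rw [h0] at h
    interval_cases m
    simp
  | cons x as ih =>
    cases b with
    | nil =>
      rw [pvLcp_nil_right] at h
      have hm : m = 0 := by omega
      subst hm; simp
    | cons y bs =>
      cases m with
      | zero => simp
      | succ m =>
        simp only [pvLcp] at h
        by_cases hxy : x = y
        · subst hxy
          rw [if_pos rfl] at h
          simp only [List.take_succ_cons, List.cons.injEq, true_and]
          exact ih bs m (by omega)
        · simp [hxy] at h

-- mismatch at the lcp position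
theorem pvLcp_getElem?_ne (a b : List Char) (h : pvLcp a b < a.length) :
    a[pvLcp a b]? ≠ b[pvLcp a b]? := by
  induction a generalizing b with
  | nil => simp at h
  | cons x as ih =>
    cases b with
    | nil => simp [pvLcp_nil_right]
    | cons y bs =>
      by_cases hxy : x = y
      · subst hxy
        have hun : pvLcp (x::as) (x::bs) = pvLcp as bs + 1 := by simp [pvLcp]
        rw [hun] at h ⊢
        simp only [List.getElem?_cons_succ]
        exact ih bs (by simp only [List.length_cons] at h; omega)
      · have hun : pvLcp (x::as) (y::bs) = 0 := by simp [pvLcp, hxy]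
        rw [hun]
        simp [hxy]

theorem pvLcp_split (a b : List Char) (m : Nat) (ht : a.take m = b.take m)
    (ha : m ≤ a.length) (hb : m ≤ b.length) :
    pvLcp a b = m + pvLcp (a.drop m) (b.drop m) := by
  induction m generalizing a b with
  | zero => simp
  | succ m ih =>
    cases a with
    | nil => simp at ha
    | cons x as =>
      cases b with
      | nil => simp at hb
      | cons y bs =>
        simp only [List.take_succ_cons, List.cons.injEq] at ht
        simp only [pvLcp, if_pos ht.1, List.drop_succ_cons]
        rw [ih as bs ht.2 (by simpa using ha) (by simpa using hb)]
        omega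

theorem pvLcp_congr (a b b' : List Char) (m : Nat) (ht : b.take m = b'.take m)
    (h : pvLcp a b < m) : pvLcp a b' = pvLcp a b := by
  induction m generalizing a b b' with
  | zero => omega
  | succ m ih =>
    cases a with
    | nil => simp [pvLcp]
    | cons x as =>
      cases b with
      | nil =>
        simp only [List.take_nil] at ht
        have : b' = [] := by
          cases b' with
          | nil => rfl
          | cons y' bs' => simp at ht
        simp [this]
      | cons y bs =>
        cases b' with
        | nil => simp at ht
        | cons y' bs' =>
          simp only [List.take_succ_cons, List.cons.injEq] at ht
          obtain ⟨rfl, ht2⟩ := ht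
          simp only [pvLcp] at h ⊢
          by_cases hxy : x = y
          · simp only [if_pos hxy] at h ⊢
            rw [ih as bs bs' ht2 (by omega)]
          · simp [hxy]

theorem pvLcp_zero_of_ne (a b : List Char) (h : a[0]? ≠ b[0]?) : pvLcp a b = 0 := by
  cases a with
  | nil => rfl
  | cons x as =>
    cases b with
    | nil => rfl
    | cons y bs =>
      simp only [List.getElem?_cons_zero, ne_eq, Option.some.injEq] at h
      simp [pvLcp, h]

theorem pvLcp_eq_length_iff (a b : List Char) : pvLcp a b = b.length ↔ a.take b.length = b := by
  induction a generalizing b with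
  | nil =>
    cases b with
    | nil => simp [pvLcp]
    | cons y bs => simp [pvLcp]
  | cons x as ih =>
    cases b with
    | nil => simp [pvLcp]
    | cons y bs =>
      simp only [pvLcp, List.length_cons, List.take_succ_cons, List.cons.injEq]
      by_cases hxy : x = y
      · subst hxy
        rw [if_pos rfl]
        simp only [true_and]
        constructor
        · intro hh; exact (ih bs).mp (by omega)
        · intro hh; have := (ih bs).mpr hh; omega
      · rw [if_neg hxy]
        simp only [hxy, false_and, iff_false]
        omega

theorem pvLcp_nil_left (b : List Char) : pvLcp [] b = 0 := by
  cases b <;> rfl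

theorem pvZext_eq (s : List Char) (fuel j k cnt : Nat) (hf : s.length - j ≤ fuel) :
    pvZext s fuel j k cnt = (cnt + pvLcp (s.drop j) (s.drop k), j + pvLcp (s.drop j) (s.drop k)) := by
  induction fuel generalizing j k cnt with
  | zero =>
    have hnil : s.drop j = [] := List.drop_eq_nil_of_le (by omega)
    rw [pvZext, hnil, pvLcp_nil_left]
    simp
  | succ fuel ih =>
    rw [pvZext]
    by_cases h : j < s.length ∧ s[j]? = s[k]?
    · rw [if_pos h]
      obtain ⟨hj, heq⟩ := h
      have hk : k < s.length := by
        by_contra hk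
        rw [List.getElem?_eq_getElem hj, List.getElem?_eq_none (Nat.le_of_not_lt hk)] at heq
        simp at heq
      rw [ih (j+1) (k+1) (cnt+1) (by omega)]
      rw [List.drop_eq_getElem_cons hj, List.drop_eq_getElem_cons hk]
      have hcc : s[j] = s[k] := by
        rw [List.getElem?_eq_getElem hj, List.getElem?_eq_getElem hk] at heq
        exact Option.some.inj heq
      simp only [pvLcp, if_pos hcc, Prod.mk.injEq]
      constructor <;> omega
    · rw [if_neg h]
      have h0 : pvLcp (s.drop j) (s.drop k) = 0 := by
        by_cases hj : j < s.length
        · have heq : s[j]? ≠ s[k]? := by tauto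
          apply pvLcp_zero_of_ne
          simpa using heq
        · rw [List.drop_eq_nil_of_le (by omega)]
          rw [pvLcp_nil_left]
      simp [h0]

theorem pvZ_le (s : List Char) (i : Nat) : pvZ s i ≤ s.length - i := by
  have := pvLcp_le_right s (s.drop i)
  simpa [pvZ] using this

theorem pvGetD_set_self (l : List Nat) (i v : Nat) (h : i < l.length) :
    (l.set i v).getD i 0 = v := by
  simp [List.getD, h]

theorem pvGetD_set_ne (l : List Nat) (i j v : Nat) (h : i ≠ j) :
    (l.set i v).getD j 0 = l.getD j 0 := by
  simp [List.getD, List.getElem?_set_ne h]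

theorem pvTake_drop (l : List Char) (d m : Nat) :
    (l.drop d).take m = (l.take (d+m)).drop d := by
  rw [List.drop_take]; congr 1; omega

theorem pvZmain_correct (s : List Char) (fuel i : Nat) (z : List Nat) (l r : Nat)
    (hf : fuel = s.length - i) (hi : 1 ≤ i) (hlen : z.length = s.length)
    (hz : ∀ t, t < i → z.getD t 0 = pvZ s t)
    (hbox : (l = 0 ∧ r = 0) ∨ (1 ≤ l ∧ l < i ∧ l ≤ r ∧ pvZ s l = r - l + 1)) :
    ∀ t, t < s.length → (pvZmain s fuel i z l r).getD t 0 = pvZ s t := by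
  have main : ∀ (m i : Nat) (z : List Nat) (l r : Nat), m = s.length - i → 1 ≤ i →
      z.length = s.length → (∀ t, t < i → z.getD t 0 = pvZ s t) →
      ((l = 0 ∧ r = 0) ∨ (1 ≤ l ∧ l < i ∧ l ≤ r ∧ pvZ s l = r - l + 1)) →
      ∀ t, t < s.length → (pvZmain s m i z l r).getD t 0 = pvZ s t := by
    intro m
    induction m with
    | zero =>
      intro i z l r hm hi hlen hz hbox t ht
      rw [pvZmain]
      exact hz t (by omega)
    | succ m ih =>
      intro i z l r hm hi hlen hz hbox t ht
      have hin : i < s.length := by omega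
      · have hset : ∀ v : Nat, v = pvZ s i →
            (∀ t', t' < i + 1 → (z.set i v).getD t' 0 = pvZ s t') := by
          intro v hv t' ht'
          by_cases hti : t' = i
          · subst hti; rw [pvGetD_set_self z t' v (by omega)]; exact hv
          · rw [pvGetD_set_ne z i t' v (fun hh => hti hh.symm)]
            exact hz t' (by omega)
        have hlen' : ∀ v : Nat, (z.set i v).length = s.length := by
          intro v; simp [hlen]
        rw [pvZmain]
        by_cases hir : i > r
        · -- case 1: explicit comparison from scratch
          rw [if_pos hir, pvZext_eq s (s.length - i) i 0 0 le_rfl]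
          simp only [List.drop_zero, Nat.zero_add]
          have hv1 : pvLcp (s.drop i) s = pvZ s i := by
            rw [pvLcp_comm]; rfl
          by_cases hp : pvLcp (s.drop i) s > 0
          · rw [if_pos hp]
            refine ih (i+1) _ i (i + pvLcp (s.drop i) s - 1) (by omega) (by omega)
              (hlen' _) (hset _ hv1) ?_ t ht
            right
            refine ⟨by omega, by omega, by omega, ?_⟩
            rw [hv1] at hp ⊢
            omega
          · rw [if_neg hp]
            refine ih (i+1) _ l r (by omega) (by omega) (hlen' _) (hset _ hv1) ?_ t ht
            rcases hbox with h0 | ⟨h1, h2, h3, h4⟩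
            · exact Or.inl h0
            · exact Or.inr ⟨h1, by omega, h3, h4⟩
        · -- case 2: inside a z-box
          rw [if_neg hir]
          rcases hbox with ⟨rfl, rfl⟩ | ⟨hl1, hli, hlr, hzl⟩
          · omega
          have hrn : r < s.length := by
            have := pvZ_le s l
            omega
          have hkz : z.getD (i - l) 0 = pvZ s (i - l) := hz (i - l) (by omega)
          -- the z-box gives agreement of s.drop i and s.drop (i-l) on `remaining` chars
          have htake : s.take (r - l + 1) = (s.drop l).take (r - l + 1) :=
            pvLcp_take s (s.drop l) (r - l + 1) (le_of_eq hzl.symm)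
          have hAG : (s.drop i).take (r - i + 1) = (s.drop (i - l)).take (r - i + 1) := by
            have e1 : (s.drop i).take (r - i + 1) = (s.take (r + 1)).drop i := by
              rw [pvTake_drop]; congr 2; omega
            have e2 : (s.drop (i - l)).take (r - i + 1) = (s.take (r - l + 1)).drop (i - l) := by
              rw [pvTake_drop]; congr 2; omega
            have e3 : s.take (r - l + 1) = (s.take (r + 1)).drop l := by
              rw [htake, pvTake_drop]; congr 2; omega
            rw [e1, e2, e3, List.drop_drop]
            congr 1
            omega
          by_cases h2a : z.getD (i - l) 0 < r - i + 1
          · -- case 2a: copy z[k]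
            rw [if_pos h2a]
            have hv : z.getD (i - l) 0 = pvZ s i := by
              rw [hkz]
              rw [hkz] at h2a
              exact (pvLcp_congr s (s.drop (i - l)) (s.drop i) (r - i + 1) hAG.symm h2a).symm
            refine ih (i+1) _ l r (by omega) (by omega) (hlen' _) (hset _ hv) ?_ t ht
            exact Or.inr ⟨hl1, by omega, hlr, hzl⟩
          · -- z[k] ≥ remaining: s agrees with s.drop i on the first `remaining` chars
            have hzk_ge : r - i + 1 ≤ pvZ s (i - l) := by rw [← hkz]; omega
            have h1 : s.take (r - i + 1) = (s.drop (i - l)).take (r - i + 1) :=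
              pvLcp_take s (s.drop (i - l)) (r - i + 1) hzk_ge
            have h2 : s.take (r - i + 1) = (s.drop i).take (r - i + 1) := h1.trans hAG.symm
            have hsplit : pvZ s i = (r - i + 1) + pvLcp (s.drop (r - i + 1)) (s.drop (r + 1)) := by
              have := pvLcp_split s (s.drop i) (r - i + 1) h2 (by omega) (by simp; omega)
              rw [List.drop_drop] at this
              have harg : i + (r - i + 1) = r + 1 := by omega
              rw [harg] at this
              exact this
            by_cases h2b : z.getD (i - l) 0 > r - i + 1
            · -- case 2b: z[i] = remaining
              rw [if_neg h2a, if_pos h2b]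
              have htail : pvLcp (s.drop (r - i + 1)) (s.drop (r + 1)) = 0 := by
                by_cases hr1 : r + 1 < s.length
                · apply pvLcp_zero_of_ne
                  rw [List.getElem?_drop, List.getElem?_drop, Nat.add_zero, Nat.add_zero]
                  have hsr : s[(r - i + 1)]? = s[r - l + 1]? := by
                    have hlt : r - i + 1 < pvLcp s (s.drop (i - l)) := by
                      rw [hkz] at h2b; exact h2b
                    have := pvLcp_getElem?_eq s (s.drop (i - l)) (r - i + 1) hlt
                    rw [List.getElem?_drop] at this
                    have harg : i - l + (r - i + 1) = r - l + 1 := by omega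
                    rw [harg] at this
                    exact this
                  have hne : s[r - l + 1]? ≠ s[r + 1]? := by
                    have hzl' : pvLcp s (s.drop l) = r - l + 1 := hzl
                    have hlt : pvLcp s (s.drop l) < s.length := by rw [hzl']; omega
                    have := pvLcp_getElem?_ne s (s.drop l) hlt
                    rw [hzl', List.getElem?_drop] at this
                    have harg : l + (r - l + 1) = r + 1 := by omega
                    rw [harg] at this
                    exact this
                  rw [hsr]
                  exact hne
                · have hnil : s.drop (r + 1) = [] := List.drop_eq_nil_of_le (by omega)
                  rw [hnil, pvLcp_nil_right]
              have hv : r - i + 1 = pvZ s i := by omega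
              refine ih (i+1) _ l r (by omega) (by omega) (hlen' _) (hset _ hv) ?_ t ht
              exact Or.inr ⟨hl1, by omega, hlr, hzl⟩
            · -- case 2c: z[k] = remaining, extend by explicit comparisons from r+1
              rw [if_neg h2a, if_neg h2b]
              rw [hkz] at h2a h2b
              have hzkeq : pvZ s (i - l) = r - i + 1 := by omega
              rw [pvZext_eq s (s.length - (r+1)) (r+1) (z.getD (i - l) 0) 0 le_rfl]
              simp only [hkz, hzkeq, Nat.zero_add]
              have hv : (r - i + 1) + pvLcp (s.drop (r + 1)) (s.drop (r - i + 1)) = pvZ s i := by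
                rw [pvLcp_comm]; omega
              by_cases hp : pvLcp (s.drop (r + 1)) (s.drop (r - i + 1)) > 0
              · rw [if_pos hp]
                refine ih (i+1) _ i (r + 1 + pvLcp (s.drop (r + 1)) (s.drop (r - i + 1)) - 1)
                  (by omega) (by omega) (hlen' _) (hset _ hv) ?_ t ht
                right
                refine ⟨by omega, by omega, by omega, ?_⟩
                omega
              · rw [if_neg hp]
                refine ih (i+1) _ l r (by omega) (by omega) (hlen' _) (hset _ hv) ?_ t ht
                exact Or.inr ⟨hl1, by omega, hlr, hzl⟩
  exact main fuel i z l r hf hi hlen hz hbox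

theorem pvZalgo_correct (s : List Char) (t : Nat) (h : t < s.length) :
    (pvZalgo s).getD t 0 = pvZ s t := by
  have hn : ¬ s.length = 0 := by omega
  rw [pvZalgo, if_neg hn]
  refine pvZmain_correct s (s.length - 1) 1 _ 0 0 rfl le_rfl (by simp) ?_ (Or.inl ⟨rfl, rfl⟩) t h
  intro t' ht'
  have ht0 : t' = 0 := by omega
  subst ht0
  rw [pvGetD_set_self _ _ _ (by simpa using by omega)]
  unfold pvZ
  rw [List.drop_zero, pvLcp_self]

theorem pvZ_border_iff (s : List Char) (i : Nat) (h : i ≤ s.length) :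
    (pvZ s i + i = s.length) ↔ pvIsBorder s (s.length - i) = true := by
  unfold pvZ pvIsBorder
  have hlen : (s.drop i).length = s.length - i := by simp
  have hsub : s.length - (s.length - i) = i := by omega
  rw [hsub]
  have hle := pvLcp_le_right s (s.drop i)
  rw [hlen] at hle
  constructor
  · intro hh
    have : pvLcp s (s.drop i) = (s.drop i).length := by omega
    have := (pvLcp_eq_length_iff s (s.drop i)).mp this
    rw [hlen] at this
    simp [this]
  · intro hh
    have : s.drop i = s.take (s.length - i) := by
      simpa using hh
    have h2 : pvLcp s (s.drop i) = (s.drop i).length :=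
      (pvLcp_eq_length_iff s (s.drop i)).mpr (by rw [hlen]; exact this.symm)
    rw [hlen] at h2
    omega

theorem pvG_eq (s : List Char) (m : Nat) (h : m ≤ s.length) :
    (List.range' 1 m).foldl
      (fun g L => g ++ [if pvIsBorder s L then L else g.getLastD 0]) [0]
    = (List.range (m+1)).map (pvMB s) := by
  induction m with
  | zero => simp [pvMB]
  | succ m ih =>
    rw [List.range'_1_concat, List.foldl_append, ih (by omega)]
    have hlast : ((List.range (m+1)).map (pvMB s)).getLastD 0 = pvMB s m := by
      rw [List.range_succ, List.map_append]
      simp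
    simp only [List.foldl_cons, List.foldl_nil, hlast]
    rw [List.range_succ (n := m+1), List.map_append]
    simp [pvMB, Nat.add_comm 1 m]

theorem pvFillA_eq (s : List Char) (z : List Nat) (hn : 1 ≤ s.length)
    (hz : ∀ t, t < s.length → z.getD t 0 = pvZ s t) (c : Nat) (hc : c ≤ s.length) :
    pvFillA s z c = (List.range' (s.length - c) (c+1)).map
      (fun i => ((min (pvMB s (s.length - i)) (s.length - 1) : Nat) : Int)) := by
  induction c with
  | zero => simp [pvFillA, List.range', pvMB]
  | succ c ihc =>
    have hc' : c ≤ s.length := by omega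
    have hi : s.length - (c+1) < s.length := by omega
    have hzi : z.getD (s.length - (c+1)) 0 = pvZ s (s.length - (c+1)) := hz _ hi
    have hbiff := pvZ_border_iff s (s.length - (c+1)) (by omega)
    have hni : s.length - (s.length - (c+1)) = c + 1 := by omega
    rw [hni] at hbiff
    have hrange : List.range' (s.length - (c+1)) (c+1+1) =
        (s.length - (c+1)) :: List.range' (s.length - c) (c+1) := by
      have harg : s.length - (c+1) + 1 = s.length - c := by omega
      rw [List.range'_succ, harg]
    have hhead : ((List.range' (s.length - c) (c+1)).map
        (fun i => ((min (pvMB s (s.length - i)) (s.length - 1) : Nat) : Int))).headD 0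
        = ((min (pvMB s c) (s.length - 1) : Nat) : Int) := by
      have harg2 : s.length - (s.length - c) = c := by omega
      rw [List.range'_succ, List.map_cons]
      simp only [List.headD_cons]
      rw [harg2]
    rw [pvFillA, ihc (by omega), hrange, List.map_cons]
    congr 1
    rw [hzi, hni]
    by_cases hb : pvIsBorder s (c+1) = true
    · have hcond : pvZ s (s.length - (c+1)) + (s.length - (c+1)) = s.length := hbiff.mpr hb
      rw [if_pos hcond]
      have hle := pvZ_le s (s.length - (c+1))
      have hzval : pvZ s (s.length - (c+1)) = c + 1 := by omega
      rw [hzval]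
      have hmb : pvMB s (c+1) = c+1 := by simp [pvMB, hb]
      rw [hmb]
      split_ifs with hgt
      · push_cast at hgt ⊢; omega
      · push_cast at hgt ⊢; omega
    · have hcond : ¬ (pvZ s (s.length - (c+1)) + (s.length - (c+1)) = s.length) :=
        fun hh => hb (hbiff.mp hh)
      rw [if_neg hcond, hhead]
      have hmb : pvMB s (c+1) = pvMB s c := by simp [pvMB, hb]
      rw [hmb]
      split_ifs with hgt
      · exfalso
        push_cast at hgt
        have := Nat.min_le_right (pvMB s c) (s.length - 1)
        omega
      · rfl

-- ===== VERDICT (by name: the statement is the Claim_ definition above) =====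
theorem pvGetD_map_range (f : Nat → Nat) (m k : Nat) (h : k < m) :
    ((List.range m).map f).getD k 0 = f k := by
  simp [List.getD, h]

theorem get_matched_prefix_spec : Claim_equal_get_matched_prefix := by
  intro pat _
  unfold Spec_get_matched_prefix get_matched_prefix get_matched_prefix_alt
  by_cases h0 : pat.toList.length = 0
  · rw [if_pos h0, h0]
    rfl
  · rw [if_neg h0]
    rw [pvFillA_eq pat.toList (pvZalgo pat.toList) (by omega)
      (fun t ht => pvZalgo_correct pat.toList t ht) pat.toList.length le_rfl]
    rw [pvG_eq pat.toList pat.toList.length le_rfl]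
    rw [Nat.sub_self, ← List.range_eq_range']
    refine List.map_congr_left ?_
    intro i hi
    rw [List.mem_range] at hi
    rw [pvGetD_map_range (pvMB pat.toList) (pat.toList.length + 1) (pat.toList.length - i) (by omega)]
    push_cast
    omega
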